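-- pv_equiv track=rewrite | github.com/pypi-data/pypi-mirror-323 | packages/number_names/number_names-0.1.2.tar.gz/number_names-0.1.2/number_names.py | _power_name
-- ===== SOURCE A (Python) =====
-- from contextlib import suppress
--
-- _SMALL_POWERS = (
--     "",
--     "thousand",
--     "mi",
--     "bi",
--     "tri",
--     "quadri",
--     "quinti",
--     "sexti",
--     "septi",
--     "octi",
--     "noni",
-- )
--
-- _POWER_UNITS = (
--     "",
--     "un",
--     "duo",
--     "tre",
--     "quattuor",
--     "quin",
--     "sex",
--     "septen",
--     "octo",
--     "novem",
-- )
--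
-- _POWER_TENS = (
--     "",
--     "dec",
--     "vigin",
--     "trigin",
--     "quadragin",
--     "quinquagin",
--     "sexagin",
--     "septuagin",
--     "octogin",
--     "nonagin",
-- )
--
-- _POWER_HUNDREDS = (
--     "",
--     "cen",
--     "duocen",
--     "trecen",
--     "quadringen",
--     "quingen",
--     "sescen",
--     "septingen",
--     "octingen",
--     "nongen",
--     "millia",
-- )
--
-- _SMALL_SUFFIX = "llion"
--
-- _OTHER_SUFFIX = "tillion"
--
-- def _power_name(power_index: int) -> str:
--     with suppress(IndexError):
--         name = _SMALL_POWERS[power_index]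
--         if power_index > 1:
--             name += _SMALL_SUFFIX
--         return name
--     power_index -= 1
--     parts = []
--     millias = 0
--     while power_index:
--         power_index, part = divmod(power_index, 1000)
--         if not part:
--             millias += 1
--             continue
--         hundreds, units = divmod(part, 100)
--         tens, units = divmod(units, 10)
--         parts.append(
--             "".join(
--                 (
--                     _POWER_HUNDREDS[hundreds],
--                     _POWER_UNITS[units],
--                     _POWER_TENS[tens],
--                     "millia" * millias,
--                 )
--             )
--         )
--         millias += 1
--     return "".join(parts[::-1] + [_OTHER_SUFFIX]).replace("dectillion", "decillion")
-- ===== SOURCE B (Python) =====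
-- _SMALL_POWERS = (
--     "", "thousand", "mi", "bi", "tri", "quadri", "quinti", "sexti", "septi",
--     "octi", "noni",
-- )
-- _POWER_UNITS = (
--     "", "un", "duo", "tre", "quattuor", "quin", "sex", "septen", "octo", "novem",
-- )
-- _POWER_TENS = (
--     "", "dec", "vigin", "trigin", "quadragin", "quinquagin", "sexagin",
--     "septuagin", "octogin", "nonagin",
-- )
-- _POWER_HUNDREDS = (
--     "", "cen", "duocen", "trecen", "quadringen", "quingen", "sescen",
--     "septingen", "octingen", "nongen", "millia",
-- )
-- _SMALL_SUFFIX = "llion"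
-- _OTHER_SUFFIX = "tillion"
--
--
-- def _power_name(power_index: int) -> str:
--     # Small/negative-index fast path as an explicit range test (Python's
--     # negative indexing reads the table from the end).
--     if -len(_SMALL_POWERS) <= power_index < len(_SMALL_POWERS):
--         name = _SMALL_POWERS[power_index]
--         return name + _SMALL_SUFFIX if power_index > 1 else name
--     # General case: no divmod peeling loop at all.  Render power_index - 1 as
--     # its decimal string, zero-pad it to a multiple of three, and walk the
--     # 3-character slots left to right, naming each nonzero slot directly in
--     # final (most-significant-first) order -- no parts list, no reversal.
--     digits = str(power_index - 1)
--     digits = "0" * (-len(digits) % 3) + digits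
--     k = len(digits) // 3
--     result = ""
--     for j in range(0, len(digits), 3):
--         h = ord(digits[j]) - 48
--         t = ord(digits[j + 1]) - 48
--         u = ord(digits[j + 2]) - 48
--         if h or t or u:
--             result += (_POWER_HUNDREDS[h] + _POWER_UNITS[u] + _POWER_TENS[t]
--                        + "millia" * (k - 1 - j // 3))
--     return (result + _OTHER_SUFFIX).replace("dectillion", "decillion")
-- ===== Notes on version B (the rewrite author's own statement) =====
-- stated objective: alternative
-- what changed: B drops A's base-1000 divmod peeling loop (parts list built little-end-first with a running millias counter, then reversed and joined) and instead renders power_index-1 as its decimal string, zero-pads it to a multiple of three, and names the three-character slots left to right directly in final order; the small-index fast path is an explicit range test instead of a suppressed IndexError. Pre_ excludes power_index <= -12, where A's while loop never terminates (divmod fixed point at -1).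
-- outside the precondition, e.g. on _power_name(-12): A does not finish within the time limit, B returns 'octingentredecillion'
import Mathlib
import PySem

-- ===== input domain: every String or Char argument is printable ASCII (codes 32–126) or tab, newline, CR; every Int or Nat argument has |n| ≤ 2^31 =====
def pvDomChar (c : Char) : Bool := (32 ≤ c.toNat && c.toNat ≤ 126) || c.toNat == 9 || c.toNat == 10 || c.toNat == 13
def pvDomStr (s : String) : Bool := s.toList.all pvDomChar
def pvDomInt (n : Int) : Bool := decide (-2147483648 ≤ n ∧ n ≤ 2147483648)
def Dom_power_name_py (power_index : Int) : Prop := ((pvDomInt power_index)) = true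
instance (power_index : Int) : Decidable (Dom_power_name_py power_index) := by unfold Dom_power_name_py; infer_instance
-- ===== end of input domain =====

-- B replaces A's base-1000 divmod peeling loop (little-end-first parts list, running
-- millias counter, final reversal and join) by a digit-string algorithm: render
-- power_index - 1 as its decimal string, zero-pad to a multiple of three, and name the
-- three-character slots left to right directly in final order ('alternative'; same cost).

def pvSmall : List (List Char) :=
  [[], "thousand".toList, "mi".toList, "bi".toList, "tri".toList, "quadri".toList,
   "quinti".toList, "sexti".toList, "septi".toList, "octi".toList, "noni".toList]
def pvUnits : List (List Char) :=
  [[], "un".toList, "duo".toList, "tre".toList, "quattuor".toList, "quin".toList,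
   "sex".toList, "septen".toList, "octo".toList, "novem".toList]
def pvTens : List (List Char) :=
  [[], "dec".toList, "vigin".toList, "trigin".toList, "quadragin".toList,
   "quinquagin".toList, "sexagin".toList, "septuagin".toList, "octogin".toList, "nonagin".toList]
def pvHundreds : List (List Char) :=
  [[], "cen".toList, "duocen".toList, "trecen".toList, "quadringen".toList, "quingen".toList,
   "sescen".toList, "septingen".toList, "octingen".toList, "nongen".toList, "millia".toList]

-- ===== PORT A =====
def pvALoop : Nat → Int → Int → List (List Char) → List (List Char)
  | 0, _, _, parts => parts
  | fuel+1, pi, millias, parts =>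
    if pi = 0 then parts
    else
      let pi' := PySem.Int.floordiv pi 1000
      let part := PySem.Int.mod pi 1000
      if part = 0 then pvALoop fuel pi' (millias + 1) parts
      else
        let hundreds := PySem.Int.floordiv part 100
        let units0 := PySem.Int.mod part 100
        let tens := PySem.Int.floordiv units0 10
        let units := PySem.Int.mod units0 10
        pvALoop fuel pi' (millias + 1)
          (parts ++ [(PySem.List.pyGet? pvHundreds hundreds).getD [] ++
                     (PySem.List.pyGet? pvUnits units).getD [] ++
                     (PySem.List.pyGet? pvTens tens).getD [] ++
                     PySem.List.pyRepeat "millia".toList millias])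

def power_name_py (power_index : Int) : String :=
  match PySem.List.pyGet? pvSmall power_index with
  | some name =>
    String.ofList (if power_index > 1 then name ++ "llion".toList else name)
  | none =>
    let n := power_index - 1
    let parts := pvALoop (n.toNat + 1) n 0 []
    String.ofList (PySem.Chars.replace
      ((((PySem.List.slice? parts none none (-1)).getD []) ++ ["tillion".toList]).flatten)
      "dectillion".toList "decillion".toList)

-- ===== PORT B =====
def power_name_py_alt (power_index : Int) : String :=
  if -(pvSmall.length : Int) ≤ power_index ∧ power_index < (pvSmall.length : Int) then
    let name := (PySem.List.pyGet? pvSmall power_index).getD []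
    String.ofList (if power_index > 1 then name ++ "llion".toList else name)
  else
    let ds0 := PySem.Int.toChars (power_index - 1)
    let digits := PySem.List.pyRepeat ['0'] (PySem.Int.mod (-(ds0.length : Int)) 3) ++ ds0
    let k := PySem.Int.floordiv (digits.length : Int) 3
    let result := (PySem.List.pyRange 0 (digits.length : Int) 3).foldl (fun acc j =>
      let h : Int := (((PySem.List.pyGet? digits j).getD '0').toNat : Int) - 48
      let t : Int := (((PySem.List.pyGet? digits (j+1)).getD '0').toNat : Int) - 48
      let u : Int := (((PySem.List.pyGet? digits (j+2)).getD '0').toNat : Int) - 48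
      if h ≠ 0 ∨ t ≠ 0 ∨ u ≠ 0 then
        acc ++ (PySem.List.pyGet? pvHundreds h).getD [] ++
               (PySem.List.pyGet? pvUnits u).getD [] ++
               (PySem.List.pyGet? pvTens t).getD [] ++
               PySem.List.pyRepeat "millia".toList (k - 1 - PySem.Int.floordiv j 3)
      else acc) []
    String.ofList (PySem.Chars.replace (result ++ "tillion".toList)
      "dectillion".toList "decillion".toList)

-- ===== PRECONDITION & SPEC =====
-- Pre_ excludes power_index ≤ -12, the only inputs on which A does not return: there
-- the IndexError fast path misses and A's while loop never terminates (divmod(n, 1000)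
-- has the fixed point n = -1); A returns normally on exactly power_index ≥ -11.
def Pre_power_name_py (power_index : Int) : Prop := -11 ≤ power_index
instance (power_index : Int) : Decidable (Pre_power_name_py power_index) := by
  unfold Pre_power_name_py; infer_instance
def pvWitness_power_name_py : Int := (25)

def Spec_power_name_py (power_index : Int) (out : String) : Prop := out = power_name_py_alt power_index
instance (power_index : Int) (out : String) : Decidable (Spec_power_name_py power_index out) := by
  unfold Spec_power_name_py; infer_instance

-- ===== CLAIM (what is proved, stated in full; the proofs are below) =====
def Claim_equal_power_name_py : Prop := ∀ (power_index : Int), Dom_power_name_py power_index → Pre_power_name_py power_index → Spec_power_name_py power_index (power_name_py power_index)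

-- ===== LEMMAS AND PROOFS =====

def pvDec : Nat → Nat → List Nat
  | 0, _ => []
  | w+1, n => pvDec w (n / 10) ++ [n % 10]

theorem pvDec_step (w n : Nat) : pvDec (w + 1) n = pvDec w (n / 10) ++ [n % 10] := rfl

theorem pvDec_length (w : Nat) : ∀ n, (pvDec w n).length = w := by
  induction w with
  | zero => intro n; rfl
  | succ w ih => intro n; simp [pvDec, ih]

theorem pvDec_succ3 (w n : Nat) :
    pvDec (w + 3) n = pvDec w (n / 1000) ++ pvDec 3 (n % 1000) := by
  simp only [show w + 3 = w + 1 + 1 + 1 from rfl, pvDec_step, show (3:Nat) = 0+1+1+1 from rfl]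
  have h1 : n / 10 / 10 / 10 = n / 1000 := by omega
  have h2 : n % 1000 / 10 / 10 = n / 100 % 10 := by omega
  have h2' : n / 10 / 10 = n / 100 := by omega
  have h3 : n % 1000 / 10 % 10 = n / 10 % 10 := by omega
  have h4 : n % 1000 % 10 = n % 10 := by omega
  have h6 : n / 100 / 10 = n / 1000 := by omega
  simp [pvDec, h2, h2', h3, h4, h6, List.append_assoc]

theorem pvDec_zero_pad (w n : Nat) (h : n < 10 ^ w) : pvDec (w + 1) n = 0 :: pvDec w n := by
  induction w generalizing n with
  | zero => interval_cases n; rfl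
  | succ w ih =>
    have hlt : n / 10 < 10 ^ w := by
      have := Nat.pow_succ 10 w ▸ h; omega
    rw [pvDec_step (w+1) n, ih _ hlt, pvDec_step w n]
    rfl

theorem pvDec_pad (w n : Nat) (h : n < 10 ^ w) : ∀ e, pvDec (w + e) n = List.replicate e 0 ++ pvDec w n := by
  intro e
  induction e with
  | zero => simp
  | succ e ih =>
    have hlt : n < 10 ^ (w + e) := lt_of_lt_of_le h (Nat.pow_le_pow_right (by norm_num) (by omega))
    rw [show w + (e+1) = (w + e) + 1 from rfl, pvDec_zero_pad _ _ hlt, ih]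
    simp [List.replicate_succ]

theorem pvDigitChar_toNat (d : Nat) (h : d < 10) : ((Nat.digitChar d).toNat : Int) - 48 = (d : Int) := by
  interval_cases d <;> rfl

theorem pvToDigitsCore_eq (fuel : Nat) : ∀ (n : Nat) (ds : List Char), n < fuel →
    Nat.toDigitsCore 10 fuel n ds = (pvDec (Nat.log 10 n + 1) n).map Nat.digitChar ++ ds := by
  induction fuel with
  | zero => intro n ds h; omega
  | succ fuel ih =>
    intro n ds h
    rw [Nat.toDigitsCore]
    by_cases h10 : n / 10 = 0
    · have hn : n < 10 := by omega
      have hlog : Nat.log 10 n = 0 := Nat.log_eq_zero_iff.mpr (Or.inl hn)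
      simp [h10, hlog, pvDec, Nat.mod_eq_of_lt hn]
    · have hge : 10 ≤ n := by omega
      have hrec : n / 10 < fuel := by
        have : n / 10 < n := Nat.div_lt_self (by omega) (by norm_num)
        omega
      rw [if_neg h10, ih _ _ hrec]
      have hlog : Nat.log 10 n = Nat.log 10 (n / 10) + 1 := by
        have h1 := Nat.log_div_base 10 n
        have h2 : 1 ≤ Nat.log 10 n := by
          rw [Nat.le_log_iff_pow_le (by norm_num) (by omega)]
          simpa using hge
        omega
      rw [hlog]
      simp [pvDec_step, Nat.log_div_base, List.append_assoc]

theorem pvToDigits_eq (n : Nat) :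
    Nat.toDigits 10 n = (pvDec (Nat.log 10 n + 1) n).map Nat.digitChar := by
  rw [Nat.toDigits, pvToDigitsCore_eq (n+1) n [] (by omega)]
  simp

def pvChunks (n : Nat) : List Nat :=
  if h : n = 0 then [] else n % 1000 :: pvChunks (n / 1000)
  decreasing_by exact Nat.div_lt_self (Nat.pos_of_ne_zero h) (by norm_num)

theorem pvChunks_lt (n : Nat) : n < 1000 ^ (pvChunks n).length := by
  induction n using Nat.strong_induction_on with
  | _ n ih =>
    rw [pvChunks]
    by_cases h : n = 0
    · simp [h]
    · have hrec := ih (n / 1000) (Nat.div_lt_self (by omega) (by norm_num))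
      simp only [h, dite_false, List.length_cons, pow_succ]
      have : n < 1000 * (n / 1000) + 1000 := by omega
      calc n < (n / 1000 + 1) * 1000 := by omega
        _ ≤ 1000 ^ (pvChunks (n / 1000)).length * 1000 := by
              exact Nat.mul_le_mul_right _ (by omega)

theorem pvChunks_le (n : Nat) (h : n ≠ 0) : 1000 ^ ((pvChunks n).length - 1) ≤ n := by
  induction n using Nat.strong_induction_on with
  | _ n ih =>
    rw [pvChunks]
    simp only [h, dite_false, List.length_cons, Nat.add_sub_cancel]
    by_cases h2 : n / 1000 = 0
    · rw [pvChunks, dif_pos h2]; simpa using Nat.pos_of_ne_zero h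
    · have hrec := ih (n / 1000) (Nat.div_lt_self (by omega) (by norm_num)) h2
      have hlen : 1 ≤ (pvChunks (n / 1000)).length := by
        rw [pvChunks, dif_neg h2]; simp
      calc 1000 ^ (pvChunks (n / 1000)).length
          = 1000 ^ ((pvChunks (n / 1000)).length - 1) * 1000 := by
            rw [← pow_succ]; congr 1; omega
        _ ≤ (n / 1000) * 1000 := Nat.mul_le_mul_right _ hrec
        _ ≤ n := by omega

theorem pvDec_groups (n : Nat) :
    pvDec (3 * (pvChunks n).length) n = ((pvChunks n).reverse.map (fun d => pvDec 3 d)).flatten := by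
  induction n using Nat.strong_induction_on with
  | _ n ih =>
    rw [pvChunks]
    by_cases h : n = 0
    · simp [h, pvDec]
    · have hrec := ih (n / 1000) (Nat.div_lt_self (by omega) (by norm_num))
      simp only [h, dite_false, List.length_cons, List.reverse_cons, List.map_append,
        List.flatten_append, List.map_cons, List.flatten_cons, List.map_nil, List.flatten_nil,
        List.append_nil]
      rw [show 3 * ((pvChunks (n / 1000)).length + 1) = 3 * (pvChunks (n / 1000)).length + 3 from by ring,
        pvDec_succ3, hrec]

def pvGrp (d i : Nat) : List Char :=
  (PySem.List.pyGet? pvHundreds ((d / 100 : Nat) : Int)).getD [] ++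
  (PySem.List.pyGet? pvUnits ((d % 10 : Nat) : Int)).getD [] ++
  (PySem.List.pyGet? pvTens ((d / 10 % 10 : Nat) : Int)).getD [] ++
  PySem.List.pyRepeat "millia".toList (i : Int)

def pvRenderLE : List Nat → Nat → List (List Char)
  | [], _ => []
  | d :: ds, i => (if d = 0 then [] else [pvGrp d i]) ++ pvRenderLE ds (i + 1)

def pvRenderBE : List Nat → Nat → List Char
  | [], _ => []
  | d :: t, i => (if d = 0 then [] else pvGrp d (t.length + i)) ++ pvRenderBE t i

theorem pvRenderBE_append (l : List Nat) (d i : Nat) :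
    pvRenderBE (l ++ [d]) i = pvRenderBE l (i + 1) ++ (if d = 0 then [] else pvGrp d i) := by
  induction l with
  | nil => simp [pvRenderBE]
  | cons x t ih =>
    simp only [List.cons_append, pvRenderBE, ih, List.append_assoc]
    have he : (t ++ [d]).length + i = t.length + (i + 1) := by simp; omega
    rw [he]

theorem pvRenderLE_reverse (ds : List Nat) : ∀ (i : Nat),
    (List.reverse (pvRenderLE ds i)).flatten = pvRenderBE ds.reverse i := by
  induction ds with
  | nil => intro i; simp [pvRenderLE, pvRenderBE]
  | cons d t ih =>
    intro i
    simp only [pvRenderLE, List.reverse_append, List.reverse_cons, List.flatten_append, ih,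
      pvRenderBE_append]
    by_cases h : d = 0 <;> simp [h]

theorem pvRenderBE_flatMap (bs : List Nat) :
    (List.range bs.length).flatMap
      (fun q => if bs.getD q 0 = 0 then [] else pvGrp (bs.getD q 0) (bs.length - 1 - q)) =
    pvRenderBE bs 0 := by
  induction bs with
  | nil => simp [pvRenderBE]
  | cons d t ih =>
    simp only [List.length_cons, List.range_succ_eq_map, List.flatMap_cons, List.flatMap_map]
    rw [pvRenderBE]
    congr 1
    rw [← ih, List.flatMap_def, List.flatMap_def]
    congr 1
    apply List.map_congr_left
    intro q hq
    have : t.length - (q + 1) = t.length - 1 - q := by omega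
    simp [List.getD, this]

theorem pvALoop_eq (fuel : Nat) : ∀ (N i : Nat) (parts : List (List Char)), N < fuel →
    pvALoop fuel (N : Int) (i : Int) parts = parts ++ pvRenderLE (pvChunks N) i := by
  induction fuel with
  | zero => intro N i parts h; omega
  | succ fuel ih =>
    intro N i parts h
    rw [pvALoop, pvChunks]
    by_cases h0 : N = 0
    · simp [h0, pvRenderLE]
    · have hne : (N : Int) ≠ 0 := by exact_mod_cast h0
      rw [if_neg hne]
      have hd : PySem.Int.floordiv (N : Int) 1000 = ((N / 1000 : Nat) : Int) := by
        rw [PySem.Int.floordiv_eq_ediv_of_pos (by norm_num)]; omega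
      have hm : PySem.Int.mod (N : Int) 1000 = ((N % 1000 : Nat) : Int) := by
        rw [PySem.Int.mod_eq_emod_of_pos (by norm_num)]; omega
      have hrec : N / 1000 < fuel := by
        have : N / 1000 < N := Nat.div_lt_self (by omega) (by norm_num)
        omega
      have hcast : (i : Int) + 1 = ((i + 1 : Nat) : Int) := by push_cast; ring
      rw [hd, hm]
      by_cases hz : N % 1000 = 0
      · rw [if_pos (by exact_mod_cast hz), hcast, ih _ _ _ hrec]
        simp [hz, pvRenderLE, h0]
      · have hzi : ((N % 1000 : Nat) : Int) ≠ 0 := by exact_mod_cast hz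
        rw [if_neg hzi]
        have hh : PySem.Int.floordiv ((N % 1000 : Nat) : Int) 100 = ((N % 1000 / 100 : Nat) : Int) := by
          rw [PySem.Int.floordiv_eq_ediv_of_pos (by norm_num)]; omega
        have hu0 : PySem.Int.mod ((N % 1000 : Nat) : Int) 100 = ((N % 1000 % 100 : Nat) : Int) := by
          rw [PySem.Int.mod_eq_emod_of_pos (by norm_num)]; omega
        have ht : PySem.Int.floordiv ((N % 1000 % 100 : Nat) : Int) 10 = ((N % 1000 / 10 % 10 : Nat) : Int) := by
          rw [PySem.Int.floordiv_eq_ediv_of_pos (by norm_num)]; omega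
        have hu : PySem.Int.mod ((N % 1000 % 100 : Nat) : Int) 10 = ((N % 1000 % 10 : Nat) : Int) := by
          rw [PySem.Int.mod_eq_emod_of_pos (by norm_num)]; omega
        simp only [hh, hu0, ht, hu, hcast]
        rw [ih _ _ _ hrec]
        simp only [dif_neg h0, pvRenderLE, if_neg hz, List.append_assoc, List.singleton_append]
        simp [pvGrp, List.append_assoc]

theorem pvChunks_entries (n : Nat) : ∀ x ∈ pvChunks n, x < 1000 := by
  induction n using Nat.strong_induction_on with
  | _ n ih =>
    intro x hx
    rw [pvChunks] at hx
    by_cases h : n = 0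
    · simp [h] at hx
    · rw [dif_neg h] at hx
      rcases List.mem_cons.mp hx with h' | h'
      · omega
      · exact ih (n / 1000) (Nat.div_lt_self (by omega) (by norm_num)) x h'

theorem pvDec3_eq (d : Nat) (h : d < 1000) : pvDec 3 d = [d / 100, d / 10 % 10, d % 10] := by
  show pvDec (0+1+1+1) d = _
  simp only [pvDec]
  have h1 : d / 10 / 10 = d / 100 := by omega
  have h2 : d / 100 % 10 = d / 100 := by omega
  simp [h1, h2]

theorem pvFlatten3_getD (bs : List Nat) : ∀ (q r : Nat), q < bs.length → r < 3 →
    ((bs.map (fun d => pvDec 3 d)).flatten).getD (3 * q + r) 0 =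
      (pvDec 3 (bs.getD q 0)).getD r 0 := by
  induction bs with
  | nil => intro q r hq hr; simp at hq
  | cons d t ih =>
    intro q r hq hr
    simp only [List.map_cons, List.flatten_cons]
    match q with
    | 0 =>
      have hlen : r < (pvDec 3 d).length := by rw [pvDec_length]; omega
      simp only [Nat.mul_zero, Nat.zero_add]
      rw [List.getD_append _ _ _ _ hlen]
      simp [List.getD]
    | q + 1 =>
      have hlen : (pvDec 3 d).length ≤ 3 * (q + 1) + r := by rw [pvDec_length]; omega
      rw [List.getD_append_right _ _ _ _ hlen]
      have : 3 * (q + 1) + r - (pvDec 3 d).length = 3 * q + r := by rw [pvDec_length]; omega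
      rw [this, ih q r (by simpa using hq) hr]
      simp [List.getD]

theorem pv_main (pi : Int) (hpre : -11 ≤ pi) : power_name_py pi = power_name_py_alt pi := by
  by_cases hlt : pi < 11
  · interval_cases pi <;> rfl
  · rw [not_lt] at hlt
    unfold power_name_py power_name_py_alt
    have hnone : PySem.List.pyGet? pvSmall pi = none := by
      rw [PySem.List.pyGet?_eq_none_iff]
      simp only [PySem.Raise.InRange, pvSmall]
      simp
      intro _
      omega
    rw [hnone]
    have hcond : ¬(-(pvSmall.length : Int) ≤ pi ∧ pi < (pvSmall.length : Int)) := by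
      simp only [pvSmall]
      simp
      intro _
      omega
    rw [if_neg hcond]
    simp only []
    -- names
    set N : Nat := (pi - 1).toNat with hNdef
    have hpiN : pi - 1 = (N : Int) := by omega
    have hN10 : 10 ≤ N := by omega
    set K : Nat := (pvChunks N).length with hKdef
    set L : Nat := Nat.log 10 N + 1 with hLdef
    -- A side
    rw [hpiN]
    have hA := pvALoop_eq (N+1) N 0 [] (by omega)
    push_cast at hA
    rw [hA, List.nil_append, PySem.List.slice?_none_none_neg_one, Option.getD_some]
    rw [List.flatten_append, pvRenderLE_reverse]
    -- B side facts
    have hKpos : 1 ≤ K := by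
      rw [hKdef, pvChunks, dif_neg (by omega : ¬ N = 0)]; simp
    have hNltK : N < 10 ^ (3 * K) := by
      have := pvChunks_lt N
      calc N < 1000 ^ K := this
        _ = 10 ^ (3 * K) := by rw [show (1000:Nat) = 10 ^ 3 from rfl, ← pow_mul]
    have hKleN : 10 ^ (3 * K - 3) ≤ N := by
      have := pvChunks_le N (by omega)
      calc 10 ^ (3 * K - 3) = 1000 ^ (K - 1) := by
            rw [show (1000:Nat) = 10 ^ 3 from rfl, ← pow_mul]; congr 1; omega
        _ ≤ N := this
    have hNL : N < 10 ^ L := Nat.lt_pow_succ_log_self (by norm_num) N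
    have hLN : 10 ^ (L - 1) ≤ N := by
      rw [hLdef, Nat.add_sub_cancel]; exact Nat.pow_log_le_self 10 (by omega)
    have hL3K : L ≤ 3 * K := by
      by_contra hc
      rw [not_le] at hc
      have : 10 ^ (3 * K) ≤ 10 ^ (L - 1) := Nat.pow_le_pow_right (by norm_num) (by omega)
      omega
    have h3KL : 3 * K < L + 3 := by
      by_contra hc
      rw [not_lt] at hc
      have : 10 ^ L ≤ 10 ^ (3 * K - 3) := Nat.pow_le_pow_right (by norm_num) (by omega)
      omega
    -- decode B's digit string
    have hds0 : PySem.Int.toChars ((N : Int)) = (pvDec L N).map Nat.digitChar := by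
      rw [show PySem.Int.toChars ((N : Int)) = Nat.toDigits 10 N from by
            simp [PySem.Int.toChars]]
      rw [pvToDigits_eq]
    have hds0len : ((PySem.Int.toChars ((N : Int))).length : Int) = (L : Int) := by
      rw [hds0]; simp [pvDec_length]
    have hpad : PySem.Int.mod (-((PySem.Int.toChars ((N : Int))).length : Int)) 3
        = ((3 * K - L : Nat) : Int) := by
      rw [hds0len, PySem.Int.mod_eq_emod_of_pos (by norm_num)]
      omega
    have hdigits : PySem.List.pyRepeat ['0'] (PySem.Int.mod (-((PySem.Int.toChars ((N : Int))).length : Int)) 3)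
          ++ PySem.Int.toChars ((N : Int))
        = (pvDec (3 * K) N).map Nat.digitChar := by
      rw [hpad, PySem.List.pyRepeat_singleton, hds0]
      rw [show ((3 * K - L : Nat) : Int).toNat = 3 * K - L from by omega]
      rw [show 3 * K = L + (3 * K - L) from by omega, pvDec_pad L N hNL (3 * K - L)]
      rw [List.map_append, List.map_replicate, Nat.add_sub_cancel_left,
        show Nat.digitChar 0 = '0' from by decide]
    rw [hdigits]
    set bs : List Nat := (pvChunks N).reverse with hbs
    have hbslen : bs.length = K := by rw [hbs, List.length_reverse]
    have hdlen : ((((pvDec (3 * K) N).map Nat.digitChar).length : Nat) : Int) = ((3 * K : Nat) : Int) := by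
      simp [pvDec_length]
    have hk : PySem.Int.floordiv ((((pvDec (3 * K) N).map Nat.digitChar).length : Nat) : Int) 3 = (K : Int) := by
      rw [hdlen, PySem.Int.floordiv_eq_ediv_of_pos (by norm_num)]
      omega
    have hrange : PySem.List.pyRange 0 ((((pvDec (3 * K) N).map Nat.digitChar).length : Nat) : Int) 3
        = (List.range K).map (fun (q : Nat) => (0 : Int) + 3 * (q : Int)) := by
      rw [hdlen, PySem.List.pyRange_of_pos _ _ (by norm_num), if_pos (by push_cast; omega),
        show ((((3 * K : Nat) : Int) - 0 + 3 - 1) / 3).toNat = K from by omega]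
    rw [hrange, hk, List.foldl_map]
    -- the flattened digit list, indexed slot by slot
    have hflat := pvDec_groups N
    have hget : ∀ q r : Nat, q < K → r < 3 →
        (PySem.List.pyGet? ((pvDec (3 * K) N).map Nat.digitChar) ((3 * q + r : Nat) : Int)).getD '0'
          = Nat.digitChar ((pvDec 3 (bs.getD q 0)).getD r 0) := by
      intro q r hq hr
      rw [PySem.List.pyGet?_natCast, List.getElem?_map]
      have hlt : 3 * q + r < (pvDec (3 * K) N).length := by rw [pvDec_length]; omega
      rw [List.getElem?_eq_getElem hlt]
      simp only [Option.map_some, Option.getD_some]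
      congr 1
      rw [← List.getD_eq_getElem _ 0 hlt]
      rw [hKdef, hflat, hbs]
      exact pvFlatten3_getD ((pvChunks N).reverse) q r (by rw [List.length_reverse, ← hKdef]; omega) hr
    have hmem : ∀ q : Nat, q < K → bs.getD q 0 < 1000 := by
      intro q hq
      apply pvChunks_entries N
      rw [← List.mem_reverse, ← hbs]
      rw [List.getD_eq_getElem _ 0 (by omega : q < bs.length)]
      exact List.getElem_mem _
    rw [PySem.List.foldl_congr_mem _ _
      (fun acc q => acc ++ (if bs.getD q 0 = 0 then [] else pvGrp (bs.getD q 0) (bs.length - 1 - q))) _ ?hcongr]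
    case hcongr =>
      intro acc q hqmem
      have hq : q < K := List.mem_range.mp hqmem
      have hd1000 : bs.getD q 0 < 1000 := hmem q hq
      set d : Nat := bs.getD q 0 with hd
      simp only []
      have e0 : (0 : Int) + 3 * (q : Int) = ((3 * q + 0 : Nat) : Int) := by push_cast; ring
      have e1 : ((3 * q + 0 : Nat) : Int) + 1 = ((3 * q + 1 : Nat) : Int) := by push_cast; ring
      have e2 : ((3 * q + 0 : Nat) : Int) + 2 = ((3 * q + 2 : Nat) : Int) := by push_cast; ring
      rw [e0, e1, e2, hget q 0 hq (by norm_num), hget q 1 hq (by norm_num), hget q 2 hq (by norm_num)]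
      rw [pvDec3_eq d hd1000]
      simp only [List.getD_cons_zero, List.getD_cons_succ]
      rw [pvDigitChar_toNat (d / 100) (by omega), pvDigitChar_toNat (d / 10 % 10) (by omega),
        pvDigitChar_toNat (d % 10) (by omega)]
      have hj3 : PySem.Int.floordiv (((3 * q + 0 : Nat) : Int)) 3 = (q : Int) := by
        rw [PySem.Int.floordiv_eq_ediv_of_pos (by norm_num)]; omega
      rw [hj3]
      by_cases hdz : d = 0
      · rw [if_neg (by simp [hdz]), if_pos hdz, List.append_nil]
      · rw [if_pos (by omega), if_neg hdz]
        have hmil : (K : Int) - 1 - (q : Int) = ((K - 1 - q : Nat) : Int) := by push_cast; omega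
        rw [hmil, hbslen, hd]
        simp [pvGrp, List.getD, List.append_assoc]
    rw [PySem.List.foldl_append_eq_flatMap
      (fun q => if bs.getD q 0 = 0 then [] else pvGrp (bs.getD q 0) (bs.length - 1 - q)) _ _]
    rw [List.nil_append, ← hbslen, pvRenderBE_flatMap]
    simp

-- ===== VERDICT (by name: the statement is the Claim_ definition above) =====
theorem power_name_py_spec : Claim_equal_power_name_py := by
  intro power_index _hdom hpre
  unfold Spec_power_name_py
  exact pv_main power_index hpre
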